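-- pv_equiv track=rewrite | github.com/shuningfei/modality | program/program/europarl.py | findSeedIndirect
-- ===== SOURCE A (Python) =====
-- def findSeedIndirect(modalverb1,modalverb2,seedCategory,sourceLanguage,sourceAlign,targetLanguage,targetAlign):
-- 	modal1=""
-- 	modal2=""
-- 	seedContext=""
-- 	d=0
-- 	modal1No=0
-- 	modal2No=0
-- 	seedNo=0
-- 	for mv1 in modalverb1:
-- 		for seed in seedCategory:
-- 			if mv1 in sourceLanguage and seed in targetLanguage:
-- 				sourceNos = [i for i, x in enumerate(sourceLanguage) if x == mv1]
-- 				for sNo in sourceNos: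
-- 					alis = [i for i, x in enumerate(sourceAlign) if x == sNo]
-- 					#print alis
-- 					for a in alis:
-- 						targetNo = targetAlign[a]
-- 						target = targetLanguage[targetNo]
-- 						if target.lower() in modalverb2:
-- 							modal2 = target
-- 							modal1=mv1
-- 							seedContext = seed
-- 							d = targetLanguage.index(target) - targetLanguage.index(seed)
-- 							modal1No=sNo
-- 							modal2No=targetNo
-- 							seedNo=targetLanguage.index(seed)
-- 							#print modal1,modal2,seedContext
-- 	return modal1,modal2,seedContext,d,modal1No,modal2No,seedNo
-- ===== SOURCE B (Python) =====
-- def findSeedIndirect(modalverb1, modalverb2, seedCategory, sourceLanguage, sourceAlign, targetLanguage, targetAlign):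
--     # the seed loop in the reference repeats identical work: only the LAST seed
--     # present in targetLanguage can end up in the result, so find it once
--     lastSeed = None
--     for s in seedCategory:
--         if s in targetLanguage:
--             lastSeed = s
--     result = ("", "", "", 0, 0, 0, 0)
--     if lastSeed is None:
--         return result
--     modalverb2set = set(modalverb2)
--     # precompute value -> positions once, instead of rescanning the lists
--     # for every (modal verb, seed) pair
--     pos = {}
--     for i, w in enumerate(sourceLanguage):
--         pos.setdefault(w, []).append(i)
--     ali = {}
--     for i, v in enumerate(sourceAlign):
--         ali.setdefault(v, []).append(i)
--     seedNo = targetLanguage.index(lastSeed)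
--     for mv1 in modalverb1:
--         for sNo in pos.get(mv1, []):
--             for a in ali.get(sNo, []):
--                 targetNo = targetAlign[a]
--                 target = targetLanguage[targetNo]
--                 if target.lower() in modalverb2set:
--                     result = (mv1, target, lastSeed,
--                               targetLanguage.index(target) - seedNo,
--                               sNo, targetNo, seedNo)
--     return result
-- ===== Notes on version B (the rewrite author's own statement) =====
-- stated objective: faster
-- what changed: B factors the redundant seed loop out (only the last seed present in targetLanguage can reach the result), precomputes value-to-positions dictionaries for sourceLanguage and sourceAlign and a set for modalverb2, so the per-modal-verb rescans of the corpus lists disappear.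
import Mathlib
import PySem

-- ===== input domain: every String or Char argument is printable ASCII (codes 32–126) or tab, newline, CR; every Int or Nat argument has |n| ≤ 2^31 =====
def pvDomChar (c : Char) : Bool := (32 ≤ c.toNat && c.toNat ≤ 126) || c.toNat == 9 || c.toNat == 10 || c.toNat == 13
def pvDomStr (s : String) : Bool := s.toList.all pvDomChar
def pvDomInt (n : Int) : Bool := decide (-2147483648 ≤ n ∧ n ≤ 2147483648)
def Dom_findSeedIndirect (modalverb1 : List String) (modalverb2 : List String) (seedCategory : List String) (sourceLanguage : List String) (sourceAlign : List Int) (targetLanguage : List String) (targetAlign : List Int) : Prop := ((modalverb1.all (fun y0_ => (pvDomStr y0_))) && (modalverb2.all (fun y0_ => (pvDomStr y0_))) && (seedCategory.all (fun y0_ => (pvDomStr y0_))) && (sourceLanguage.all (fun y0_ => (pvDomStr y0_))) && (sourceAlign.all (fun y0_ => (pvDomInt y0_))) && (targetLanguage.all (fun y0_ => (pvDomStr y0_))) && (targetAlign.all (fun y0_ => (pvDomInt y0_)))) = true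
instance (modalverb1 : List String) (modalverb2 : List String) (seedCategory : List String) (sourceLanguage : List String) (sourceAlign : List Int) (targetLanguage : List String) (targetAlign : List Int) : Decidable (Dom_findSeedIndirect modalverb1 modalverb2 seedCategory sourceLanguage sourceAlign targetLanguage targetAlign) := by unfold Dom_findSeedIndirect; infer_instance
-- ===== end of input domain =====

-- B factors the redundant (modal verb × seed) seed loop out (only the last seed present in the
-- target can survive) and precomputes value→positions dictionaries instead of rescanning the
-- corpus lists for every pair; same return value on every input where A returns.

-- ===== PORT A =====
-- Python's list.index(x): both Pythons call it only on x known to be a member of the list,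
-- so index? is always `some` there and the 0 default is never taken.
def pyIndexD (tl : List String) (s : String) : Int :=
  match PySem.List.index? tl s with
  | some k => (k : Int)
  | none => 0

def findSeedIndirect (modalverb1 : List String) (modalverb2 : List String) (seedCategory : List String) (sourceLanguage : List String) (sourceAlign : List Int) (targetLanguage : List String) (targetAlign : List Int) : String × String × String × Int × Int × Int × Int :=
  modalverb1.foldl (fun st mv1 =>
    seedCategory.foldl (fun st seed =>
      if mv1 ∈ sourceLanguage ∧ seed ∈ targetLanguage then
        let sourceNos := (PySem.List.enumerate sourceLanguage 0).filterMap
          (fun p => if p.2 = mv1 then some p.1 else none)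
        sourceNos.foldl (fun st sNo =>
          let alis := (PySem.List.enumerate sourceAlign 0).filterMap
            (fun p => if p.2 = sNo then some p.1 else none)
          alis.foldl (fun st a =>
            match PySem.List.pyGet? targetAlign a with
            | none => st  -- IndexError in Python: excluded by Pre_
            | some targetNo =>
              match PySem.List.pyGet? targetLanguage targetNo with
              | none => st  -- IndexError in Python: excluded by Pre_
              | some target =>
                if PySem.Str.lower target ∈ modalverb2 then
                  (mv1, target, seed,
                    pyIndexD targetLanguage target - pyIndexD targetLanguage seed,
                    sNo, targetNo, pyIndexD targetLanguage seed)
                else st) st) st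
      else st) st)
    ("", "", "", (0 : Int), (0 : Int), (0 : Int), (0 : Int))

-- ===== PORT B =====
def findSeedIndirect_alt (modalverb1 : List String) (modalverb2 : List String) (seedCategory : List String) (sourceLanguage : List String) (sourceAlign : List Int) (targetLanguage : List String) (targetAlign : List Int) : String × String × String × Int × Int × Int × Int :=
  let lastSeed := seedCategory.foldl
    (fun acc s => if s ∈ targetLanguage then some s else acc) (none : Option String)
  let result : String × String × String × Int × Int × Int × Int :=
    ("", "", "", (0 : Int), (0 : Int), (0 : Int), (0 : Int))
  match lastSeed with
  | none => result
  | some ls =>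
    let modalverb2set : PySem.Set String := PySem.Set.ofList modalverb2
    -- pos.setdefault(w, []).append(i) sets pos[w] to pos.get(w, []) + [i]: Dict.modify is exact
    let pos : PySem.Dict String (List Int) := (PySem.List.enumerate sourceLanguage 0).foldl
      (fun d p => PySem.Dict.modify d p.2 [] (· ++ [p.1])) PySem.Dict.empty
    let ali : PySem.Dict Int (List Int) := (PySem.List.enumerate sourceAlign 0).foldl
      (fun d p => PySem.Dict.modify d p.2 [] (· ++ [p.1])) PySem.Dict.empty
    let seedNo := pyIndexD targetLanguage ls
    modalverb1.foldl (fun st mv1 =>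
      (PySem.Dict.getD pos mv1 []).foldl (fun st sNo =>
        (PySem.Dict.getD ali sNo []).foldl (fun st a =>
          match PySem.List.pyGet? targetAlign a with
          | none => st  -- IndexError in Python: excluded by Pre_
          | some targetNo =>
            match PySem.List.pyGet? targetLanguage targetNo with
            | none => st  -- IndexError in Python: excluded by Pre_
            | some target =>
              if PySem.Str.lower target ∈ modalverb2set then
                (mv1, target, ls, pyIndexD targetLanguage target - seedNo,
                  sNo, targetNo, seedNo)
              else st) st) st) result

-- ===== PRECONDITION & SPEC =====
-- Pre_ excludes exactly the inputs on which the Python A raises IndexError: an alignment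
-- position reached by the search (its source word is a first-list modal verb and some seed
-- occurs in the target, so targetAlign[a] / targetLanguage[targetNo] are evaluated) whose
-- index lies outside targetAlign or whose alignment value is no valid targetLanguage index.
def Pre_findSeedIndirect (modalverb1 : List String) (modalverb2 : List String) (seedCategory : List String) (sourceLanguage : List String) (sourceAlign : List Int) (targetLanguage : List String) (targetAlign : List Int) : Prop :=
  (∃ s ∈ seedCategory, s ∈ targetLanguage) →
    ∀ i ∈ List.range sourceAlign.length,
      (0 ≤ sourceAlign.getD i 0 ∧ sourceAlign.getD i 0 < (sourceLanguage.length : Int) ∧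
        sourceLanguage.getD (sourceAlign.getD i 0).toNat "" ∈ modalverb1) →
      (i < targetAlign.length ∧
        PySem.Raise.InRange targetLanguage.length (targetAlign.getD i 0))
instance (modalverb1 : List String) (modalverb2 : List String) (seedCategory : List String) (sourceLanguage : List String) (sourceAlign : List Int) (targetLanguage : List String) (targetAlign : List Int) : Decidable (Pre_findSeedIndirect modalverb1 modalverb2 seedCategory sourceLanguage sourceAlign targetLanguage targetAlign) := by unfold Pre_findSeedIndirect; infer_instance

def pvWitness_findSeedIndirect : List String × List String × List String × List String × List Int × List String × List Int :=
  (["can"], ["kann"], ["must"], ["can"], [0], ["Kann", "must"], [0])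

def Spec_findSeedIndirect (modalverb1 : List String) (modalverb2 : List String) (seedCategory : List String) (sourceLanguage : List String) (sourceAlign : List Int) (targetLanguage : List String) (targetAlign : List Int) (out : String × String × String × Int × Int × Int × Int) : Prop := out = findSeedIndirect_alt modalverb1 modalverb2 seedCategory sourceLanguage sourceAlign targetLanguage targetAlign
instance (modalverb1 : List String) (modalverb2 : List String) (seedCategory : List String) (sourceLanguage : List String) (sourceAlign : List Int) (targetLanguage : List String) (targetAlign : List Int) (out : String × String × String × Int × Int × Int × Int) : Decidable (Spec_findSeedIndirect modalverb1 modalverb2 seedCategory sourceLanguage sourceAlign targetLanguage targetAlign out) := by unfold Spec_findSeedIndirect; infer_instance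

-- ===== CLAIM (what is proved, stated in full; the proofs are below) =====
def Claim_equal_findSeedIndirect : Prop := ∀ (modalverb1 : List String) (modalverb2 : List String) (seedCategory : List String) (sourceLanguage : List String) (sourceAlign : List Int) (targetLanguage : List String) (targetAlign : List Int), Dom_findSeedIndirect modalverb1 modalverb2 seedCategory sourceLanguage sourceAlign targetLanguage targetAlign → Pre_findSeedIndirect modalverb1 modalverb2 seedCategory sourceLanguage sourceAlign targetLanguage targetAlign → Spec_findSeedIndirect modalverb1 modalverb2 seedCategory sourceLanguage sourceAlign targetLanguage targetAlign (findSeedIndirect modalverb1 modalverb2 seedCategory sourceLanguage sourceAlign targetLanguage targetAlign)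

-- ===== LEMMAS AND PROOFS =====

-- the result type, the default value, and the pieces of port A, named for the proofs
def pvR : Type := String × String × String × Int × Int × Int × Int

def pvDflt : String × String × String × Int × Int × Int × Int :=
  ("", "", "", (0 : Int), (0 : Int), (0 : Int), (0 : Int))

def srcNos (sourceLanguage : List String) (w : String) : List Int :=
  (PySem.List.enumerate sourceLanguage 0).filterMap
    (fun p => if p.2 = w then some p.1 else none)

def aliNos (sourceAlign : List Int) (v : Int) : List Int :=
  (PySem.List.enumerate sourceAlign 0).filterMap
    (fun p => if p.2 = v then some p.1 else none)

def innerA (modalverb2 sourceLanguage : List String) (sourceAlign : List Int)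
    (targetLanguage : List String) (targetAlign : List Int) (w s : String)
    (st : String × String × String × Int × Int × Int × Int) :
    String × String × String × Int × Int × Int × Int :=
  (srcNos sourceLanguage w).foldl (fun st sNo =>
    (aliNos sourceAlign sNo).foldl (fun st a =>
      match PySem.List.pyGet? targetAlign a with
      | none => st
      | some targetNo =>
        match PySem.List.pyGet? targetLanguage targetNo with
        | none => st
        | some target =>
          if PySem.Str.lower target ∈ modalverb2 then
            (w, target, s,
              pyIndexD targetLanguage target - pyIndexD targetLanguage s,
              sNo, targetNo, pyIndexD targetLanguage s)
          else st) st) st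

lemma A_char (modalverb1 modalverb2 seedCategory sourceLanguage : List String)
    (sourceAlign : List Int) (targetLanguage : List String) (targetAlign : List Int) :
    findSeedIndirect modalverb1 modalverb2 seedCategory sourceLanguage sourceAlign targetLanguage targetAlign
      = modalverb1.foldl (fun st w =>
          seedCategory.foldl (fun st s =>
            if w ∈ sourceLanguage ∧ s ∈ targetLanguage then
              innerA modalverb2 sourceLanguage sourceAlign targetLanguage targetAlign w s st
            else st) st) pvDflt := by
  rfl

-- a loop whose every step is the identity
lemma foldl_id_of_mem {α R : Type} (L : List α) (F : α → R → R)
    (h : ∀ x ∈ L, ∀ st, F x st = st) (st : R) :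
    L.foldl (fun st x => F x st) st = st := by
  induction L generalizing st with
  | nil => rfl
  | cons x t ih =>
    simp only [List.foldl_cons]
    rw [h x (by simp)]
    exact ih (fun y hy st => h y (by simp [hy]) st) st

-- each step of a loop (in a family parametrised by s) is the identity or ignores the
-- accumulator; then so does the whole loop
lemma fold_dichotomy {α σ R : Type} (L : List α) (F : σ → α → R → R)
    (h : ∀ x ∈ L, (∀ s st, F s x st = st) ∨ (∀ s st st', F s x st = F s x st')) :
    (∀ s st, L.foldl (fun st x => F s x st) st = st) ∨
    (∀ s st st', L.foldl (fun st x => F s x st) st = L.foldl (fun st x => F s x st) st') := by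
  induction L with
  | nil => exact Or.inl (fun s st => rfl)
  | cons x t ih =>
    have ih' := ih (fun y hy => h y (by simp [hy]))
    rcases h x (by simp) with hid | hconst
    · rcases ih' with h1 | h2
      · exact Or.inl (fun s st => by simp only [List.foldl_cons, hid s st]; exact h1 s st)
      · exact Or.inr (fun s st st' => by
          simp only [List.foldl_cons, hid s st, hid s st']; exact h2 s st st')
    · rcases ih' with h1 | h2
      · exact Or.inr (fun s st st' => by
          simp only [List.foldl_cons, h1 s (F s x st), h1 s (F s x st')]
          exact hconst s st st')
      · exact Or.inr (fun s st st' => by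
          simp only [List.foldl_cons]; exact h2 s (F s x st) (F s x st'))

-- a fold of accumulator-ignoring steps is its last step
lemma foldl_last_wins {σ R : Type} (L : List σ) (F : σ → R → R)
    (hconst : ∀ s st st', F s st = F s st') (ls : σ) (h : L.getLast? = some ls) (st : R) :
    L.foldl (fun st s => F s st) st = F ls st := by
  induction L generalizing st with
  | nil => simp at h
  | cons x t ih =>
    cases t with
    | nil =>
      simp only [List.getLast?_singleton, Option.some.injEq] at h
      subst h; rfl
    | cons y t' =>
      rw [List.getLast?_cons_cons] at h
      rw [List.foldl_cons, ih h (F x st)]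
      exact hconst ls (F x st) st

-- the 'keep the last element satisfying p' loop is getLast? of filter
lemma foldl_if_some {α : Type} (L : List α) (p : α → Prop) [DecidablePred p] (acc : Option α) :
    L.foldl (fun acc s => if p s then some s else acc) acc
      = match (L.filter (fun s => decide (p s))).getLast? with
        | some v => some v
        | none => acc := by
  induction L generalizing acc with
  | nil => rfl
  | cons x t ih =>
    simp only [List.foldl_cons, List.filter_cons]
    by_cases hx : p x
    · simp only [hx, decide_true, if_true]
      rw [ih (some x)]
      cases hft : (t.filter (fun s => decide (p s))).getLast? with
      | none =>
        rw [List.getLast?_eq_none_iff] at hft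
        simp [hft]
      | some v =>
        simp [List.getLast?_cons, hft]
    · simp only [hx, decide_false, if_false]
      exact ih acc

lemma innerA_cases (modalverb2 sourceLanguage : List String) (sourceAlign : List Int)
    (targetLanguage : List String) (targetAlign : List Int) (w : String) :
    (∀ s st, innerA modalverb2 sourceLanguage sourceAlign targetLanguage targetAlign w s st = st) ∨
    (∀ s st st', innerA modalverb2 sourceLanguage sourceAlign targetLanguage targetAlign w s st
      = innerA modalverb2 sourceLanguage sourceAlign targetLanguage targetAlign w s st') := by
  unfold innerA
  apply fold_dichotomy
  intro sNo _
  apply fold_dichotomy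
  intro a _
  cases hta : PySem.List.pyGet? targetAlign a with
  | none => exact Or.inl (fun s st => by simp)
  | some targetNo =>
    cases htl : PySem.List.pyGet? targetLanguage targetNo with
    | none => exact Or.inl (fun s st => by simp [htl])
    | some target =>
      by_cases hm : PySem.Str.lower target ∈ modalverb2
      · exact Or.inr (fun s st st' => by simp [htl, hm])
      · exact Or.inl (fun s st => by simp [htl, hm])

lemma srcNos_eq_nil (sourceLanguage : List String) (w : String) (h : w ∉ sourceLanguage) :
    srcNos sourceLanguage w = [] := by
  unfold srcNos
  rw [List.filterMap_eq_nil_iff]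
  intro p hp
  rcases (PySem.List.mem_enumerate_iff _ _ _).mp hp with ⟨k, hk, rfl⟩
  have : sourceLanguage[k] ∈ sourceLanguage := List.getElem_mem hk
  simp only []
  rw [if_neg]
  intro he
  exact h (he ▸ this)

-- the grouping dictionary built by B: its lookups are exactly A's enumerate-filter scans
lemma getD_groupFold {κ : Type} [BEq κ] [LawfulBEq κ] [DecidableEq κ]
    (E : List (Int × κ)) (w : κ) :
    PySem.Dict.getD (E.foldl (fun d p => PySem.Dict.modify d p.2 [] (· ++ [p.1])) PySem.Dict.empty) w []
      = E.filterMap (fun p => if p.2 = w then some p.1 else none) := by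
  have hswap : ∀ (t : List (Int × κ)),
      ((t.map Prod.swap).filter (fun p => p.1 == w)).map (·.2)
        = t.filterMap (fun p => if p.2 = w then some p.1 else none) := by
    intro t
    induction t with
    | nil => rfl
    | cons p t ih =>
      by_cases hp : p.2 = w
      · simp [hp, ih]
      · simp [hp, ih]
  have h1 : E.foldl (fun d p => PySem.Dict.modify d p.2 [] (· ++ [p.1])) PySem.Dict.empty
      = (E.map Prod.swap).foldl (fun d p => PySem.Dict.modify d p.1 [] (· ++ [p.2])) PySem.Dict.empty := by
    rw [List.foldl_map]
    simp [Prod.fst_swap, Prod.snd_swap]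
  rw [h1, PySem.Dict.getD_foldl_modify_append, PySem.Dict.getD_empty, List.nil_append]
  exact hswap E

lemma seedfold_eq (modalverb2 seedCategory sourceLanguage : List String) (sourceAlign : List Int)
    (targetLanguage : List String) (targetAlign : List Int) (ls : String)
    (hls : seedCategory.foldl (fun acc s => if s ∈ targetLanguage then some s else acc)
      (none : Option String) = some ls) (w : String) (st : String × String × String × Int × Int × Int × Int) :
    seedCategory.foldl (fun st s =>
        if w ∈ sourceLanguage ∧ s ∈ targetLanguage then
          innerA modalverb2 sourceLanguage sourceAlign targetLanguage targetAlign w s st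
        else st) st
      = innerA modalverb2 sourceLanguage sourceAlign targetLanguage targetAlign w ls st := by
  by_cases hw : w ∈ sourceLanguage
  · have hg : seedCategory.foldl (fun st s =>
        if w ∈ sourceLanguage ∧ s ∈ targetLanguage then
          innerA modalverb2 sourceLanguage sourceAlign targetLanguage targetAlign w s st
        else st) st
        = seedCategory.foldl (fun st s =>
            if s ∈ targetLanguage then
              innerA modalverb2 sourceLanguage sourceAlign targetLanguage targetAlign w s st
            else st) st := by
      apply PySem.List.foldl_congr_mem
      intro st s _
      by_cases hst : s ∈ targetLanguage <;> simp [hw, hst]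
    rw [hg, PySem.List.foldl_ite_eq_foldl_filter]
    have hlast : (seedCategory.filter (fun s => decide (s ∈ targetLanguage))).getLast? = some ls := by
      rw [foldl_if_some seedCategory (fun s => s ∈ targetLanguage) none] at hls
      cases hft : (seedCategory.filter (fun s => decide (s ∈ targetLanguage))).getLast? with
      | some v => rw [hft] at hls; simpa using hls
      | none => rw [hft] at hls; simp at hls
    cases innerA_cases modalverb2 sourceLanguage sourceAlign targetLanguage targetAlign w with
    | inl hid =>
      rw [foldl_id_of_mem _ _ (fun s _ st => hid s st) st, hid ls st]
    | inr hconst =>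
      exact foldl_last_wins _ _ (fun s => hconst s) ls hlast st
  · rw [foldl_id_of_mem]
    · unfold innerA
      rw [srcNos_eq_nil _ _ hw]
      rfl
    · intro s _ st'
      rw [if_neg]
      rintro ⟨h1, -⟩
      exact hw h1

-- ===== VERDICT (by name: the statement is the Claim_ definition above) =====
theorem findSeedIndirect_spec : Claim_equal_findSeedIndirect := by
  intro modalverb1 modalverb2 seedCategory sourceLanguage sourceAlign targetLanguage targetAlign hdom hpre
  unfold Spec_findSeedIndirect
  rw [A_char]
  unfold findSeedIndirect_alt
  cases hls : seedCategory.foldl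
      (fun acc s => if s ∈ targetLanguage then some s else acc) (none : Option String) with
  | none =>
    have hseeds : ∀ s ∈ seedCategory, s ∉ targetLanguage := by
      rw [foldl_if_some seedCategory (fun s => s ∈ targetLanguage) none] at hls
      cases hft : (seedCategory.filter (fun s => decide (s ∈ targetLanguage))).getLast? with
      | some v => rw [hft] at hls; simp at hls
      | none =>
        rw [List.getLast?_eq_none_iff, List.filter_eq_nil_iff] at hft
        intro s hs hmem
        have := hft s hs
        simp [hmem] at this
    apply foldl_id_of_mem
    intro w _ st
    apply foldl_id_of_mem
    intro s hs st'
    rw [if_neg]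
    rintro ⟨-, h2⟩
    exact hseeds s hs h2
  | some ls =>
    apply PySem.List.foldl_congr_mem
    intro st w _
    rw [seedfold_eq modalverb2 seedCategory sourceLanguage sourceAlign targetLanguage targetAlign ls hls w st]
    simp only [innerA, srcNos, aliNos, getD_groupFold, PySem.Set.mem_ofList]
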